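-- pv_equiv track=rewrite | github.com/Yorwba/alphabet-soup | tatoeba_data.py | split_tsv_line
-- ===== SOURCE A (Python) =====
-- def split_tsv_line(line):
--     splits = []
--     current_split = ''
--     escaped = False
--     for char in line:
--         if escaped:
--             if char not in {'\\', '\t'}:
--                 current_split += '\\'
--             current_split += char
--             escaped = False
--         elif char == '\\':
--             escaped = True
--         elif char == '\t':
--             if current_split == '\\N':
--                 current_split = None
--             splits.append(current_split)
--             current_split = ''
--         else:
--             current_split += char
--     if current_split == '\\N':
--         current_split = None
--     splits.append(current_split)
--     return splits
-- ===== SOURCE B (Python) =====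
-- # Two-phase approach: split naively on tabs, re-join pieces whose pending part
-- # ends in an odd number of backslashes (the tab was escaped), then unescape
-- # each field and map the literal '\N' field to None.
--
-- def _odd_trailing_backslashes(s):
--     return (len(s) - len(s.rstrip('\\'))) % 2 == 1
--
-- def _unescape(s):
--     out = []
--     i = 0
--     while i < len(s):
--         c = s[i]
--         if c == '\\':
--             if i + 1 < len(s):
--                 d = s[i + 1]
--                 out.append(d if d in ('\\', '\t') else '\\' + d)
--                 i += 2
--             else:
--                 i += 1  # trailing lone backslash is dropped
--         else:
--             out.append(c)
--             i += 1
--     return ''.join(out)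
--
-- def split_tsv_line(line):
--     pieces = line.split('\t')
--     merged = []
--     pending = pieces[0]
--     for p in pieces[1:]:
--         if _odd_trailing_backslashes(pending):
--             pending = pending + '\t' + p
--         else:
--             merged.append(pending)
--             pending = p
--     merged.append(pending)
--     fields = [_unescape(m) for m in merged]
--     return [None if f == '\\N' else f for f in fields]
-- ===== Notes on version B (the rewrite author's own statement) =====
-- stated objective: alternative
-- what changed: Replaced A's single fused character state machine with a three-phase pipeline: naive split on tabs, re-joining pieces that end in an odd number of backslashes (escaped tabs), then a separate per-field unescape pass and a final \N-to-None map.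
import Mathlib
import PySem

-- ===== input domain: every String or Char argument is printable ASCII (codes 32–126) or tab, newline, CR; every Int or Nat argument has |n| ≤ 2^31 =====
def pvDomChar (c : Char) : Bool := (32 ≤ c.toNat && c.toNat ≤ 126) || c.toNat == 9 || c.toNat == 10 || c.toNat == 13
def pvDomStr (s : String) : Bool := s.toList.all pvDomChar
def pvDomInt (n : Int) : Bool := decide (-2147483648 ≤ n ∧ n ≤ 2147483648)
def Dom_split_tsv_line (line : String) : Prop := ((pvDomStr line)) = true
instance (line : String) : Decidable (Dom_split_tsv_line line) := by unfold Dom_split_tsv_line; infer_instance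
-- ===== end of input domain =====

-- B re-implements A's fused char-by-char state machine as a three-phase pipeline
-- (naive tab split, re-join of pieces ending in an odd backslash run, per-field
-- unescape + '\N'→None map); same cost, alternative structure.

-- ===== PORT A =====
-- the trailing '\N' check + append, shared by the separator branch and the epilogue
def pvFinish (cur : List Char) : Option String :=
  if cur = ['\\', 'N'] then none else some (String.ofList cur)

-- A's for-loop as structural recursion over the remaining characters with the
-- same state (current_split as List Char, escaped); appends become conses of the result.
def pvLoopA : List Char → List Char → Bool → List (Option String)
  | [], cur, _ => [pvFinish cur]
  | c :: rest, cur, escaped =>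
    if escaped then
      pvLoopA rest (cur ++ (if ¬(c = '\\' ∨ c = '\t') then ['\\', c] else [c])) false
    else if c = '\\' then pvLoopA rest cur true
    else if c = '\t' then pvFinish cur :: pvLoopA rest [] false
    else pvLoopA rest (cur ++ [c]) false

def split_tsv_line (line : String) : List (Option String) :=
  pvLoopA line.toList [] false

-- ===== PORT B =====
-- port of line.split('\t') (single-character separator; '' gives ['']) — exact by hand
def pvSplitTab : List Char → List (List Char)
  | [] => [[]]
  | c :: rest =>
    if c = '\t' then [] :: pvSplitTab rest
    else match pvSplitTab rest with
         | [] => [[c]]            -- unreachable: split never returns []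
         | f :: fs => (c :: f) :: fs

-- port of _odd_trailing_backslashes (rstrip('\\') expressed via reversed takeWhile)
def pvOddTrail (s : List Char) : Bool :=
  (s.reverse.takeWhile (fun c => c == '\\')).length % 2 == 1

-- port of B's merge loop (state: pending; appends become conses of the result)
def pvMergeLoop : List (List Char) → List Char → List (List Char)
  | [], pending => [pending]
  | p :: rest, pending =>
    if pvOddTrail pending then pvMergeLoop rest (pending ++ '\t' :: p)
    else pending :: pvMergeLoop rest p

-- port of _unescape's while loop (consumes one or two characters per step)
def pvUnesc : List Char → List Char
  | [] => []
  | [c] => if c = '\\' then [] else [c]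
  | c :: d :: rest =>
    if c = '\\' then (if d = '\\' ∨ d = '\t' then [d] else ['\\', d]) ++ pvUnesc rest
    else c :: pvUnesc (d :: rest)

def split_tsv_line_alt (line : String) : List (Option String) :=
  let merged := match pvSplitTab line.toList with
    | [] => []                    -- unreachable: split never returns []
    | p :: ps => pvMergeLoop ps p
  let fields := merged.map (fun m => String.ofList (pvUnesc m))
  fields.map (fun f => if f = "\\N" then none else some f)

-- ===== PRECONDITION & SPEC =====
def Spec_split_tsv_line (line : String) (out : List (Option String)) : Prop := out = split_tsv_line_alt line
instance (line : String) (out : List (Option String)) : Decidable (Spec_split_tsv_line line out) := by unfold Spec_split_tsv_line; infer_instance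

-- ===== CLAIM (what is proved, stated in full; the proofs are below) =====
def Claim_equal_split_tsv_line : Prop := ∀ (line : String), Dom_split_tsv_line line → Spec_split_tsv_line line (split_tsv_line line)

-- ===== LEMMAS AND PROOFS =====

-- prepend chars onto the first element of a list of fields
def pvConsHead (x : List Char) : List (List Char) → List (List Char)
  | [] => [x]
  | f :: fs => (x ++ f) :: fs

-- proof-side spec: the unescaped fields of the line
def pvFields : List Char → List (List Char)
  | [] => [[]]
  | c :: rest =>
    if c = '\\' then
      match rest with
      | [] => [[]]
      | d :: rest' => pvConsHead (if d = '\\' ∨ d = '\t' then [d] else ['\\', d]) (pvFields rest')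
    else if c = '\t' then [] :: pvFields rest
    else pvConsHead [c] (pvFields rest)

-- proof-side spec: the raw (still escaped) pieces between unescaped tabs
def pvRawPieces : List Char → List (List Char)
  | [] => [[]]
  | c :: rest =>
    if c = '\\' then
      match rest with
      | [] => [['\\']]
      | d :: rest' => pvConsHead ['\\', d] (pvRawPieces rest')
    else if c = '\t' then [] :: pvRawPieces rest
    else pvConsHead [c] (pvRawPieces rest)

-- equation lemmas with literal heads (negative char-literal conditions discharged)
theorem pvFields_bs_cons (d : Char) (rest' : List Char) :
    pvFields ('\\' :: d :: rest')
      = pvConsHead (if d = '\\' ∨ d = '\t' then [d] else ['\\', d]) (pvFields rest') := by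
  rw [pvFields.eq_def]; simp

theorem pvFields_tab (rest : List Char) : pvFields ('\t' :: rest) = [] :: pvFields rest := by
  rw [pvFields.eq_def]; simp [show ('\t' : Char) ≠ '\\' from by decide]

theorem pvFields_other (c : Char) (hc : c ≠ '\\') (ht : c ≠ '\t') (rest : List Char) :
    pvFields (c :: rest) = pvConsHead [c] (pvFields rest) := by
  rw [pvFields.eq_def]; simp [hc, ht]

theorem pvRawPieces_bs_cons (d : Char) (rest' : List Char) :
    pvRawPieces ('\\' :: d :: rest') = pvConsHead ['\\', d] (pvRawPieces rest') := by
  rw [pvRawPieces.eq_def]; simp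

theorem pvRawPieces_tab (rest : List Char) : pvRawPieces ('\t' :: rest) = [] :: pvRawPieces rest := by
  rw [pvRawPieces.eq_def]; simp [show ('\t' : Char) ≠ '\\' from by decide]

theorem pvRawPieces_other (c : Char) (hc : c ≠ '\\') (ht : c ≠ '\t') (rest : List Char) :
    pvRawPieces (c :: rest) = pvConsHead [c] (pvRawPieces rest) := by
  rw [pvRawPieces.eq_def]; simp [hc, ht]

theorem pvSplitTab_tab (rest : List Char) : pvSplitTab ('\t' :: rest) = [] :: pvSplitTab rest := by
  rw [pvSplitTab.eq_def]; simp

theorem pvSplitTab_other (c : Char) (ht : c ≠ '\t') (rest : List Char) :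
    pvSplitTab (c :: rest)
      = match pvSplitTab rest with
        | [] => [[c]]
        | f :: fs => (c :: f) :: fs := by
  rw [pvSplitTab.eq_def]; simp [ht]

theorem pvConsHead_ne_nil (x : List Char) (l : List (List Char)) : pvConsHead x l ≠ [] := by
  cases l <;> simp [pvConsHead]

theorem pvConsHead_consHead (x y : List Char) (l : List (List Char)) :
    pvConsHead x (pvConsHead y l) = pvConsHead (x ++ y) l := by
  cases l <;> simp [pvConsHead]

theorem pvConsHead_nil {l : List (List Char)} (h : l ≠ []) : pvConsHead [] l = l := by
  cases l with
  | nil => exact absurd rfl h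
  | cons f fs => simp [pvConsHead]

theorem pvFields_ne_nil (chars : List Char) : pvFields chars ≠ [] := by
  match chars with
  | [] => simp [pvFields]
  | c :: rest =>
    by_cases hc : c = '\\'
    · subst hc
      match rest with
      | [] => decide
      | d :: rest' => rw [pvFields_bs_cons]; exact pvConsHead_ne_nil _ _
    · by_cases ht : c = '\t'
      · subst ht; rw [pvFields_tab]; simp
      · rw [pvFields_other c hc ht]; exact pvConsHead_ne_nil _ _

theorem pvRawPieces_ne_nil (chars : List Char) : pvRawPieces chars ≠ [] := by
  match chars with
  | [] => simp [pvRawPieces]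
  | c :: rest =>
    by_cases hc : c = '\\'
    · subst hc
      match rest with
      | [] => decide
      | d :: rest' => rw [pvRawPieces_bs_cons]; exact pvConsHead_ne_nil _ _
    · by_cases ht : c = '\t'
      · subst ht; rw [pvRawPieces_tab]; simp
      · rw [pvRawPieces_other c hc ht]; exact pvConsHead_ne_nil _ _

theorem pvSplitTab_ne_nil (chars : List Char) : pvSplitTab chars ≠ [] := by
  match chars with
  | [] => simp [pvSplitTab]
  | c :: rest =>
    by_cases ht : c = '\t'
    · subst ht; rw [pvSplitTab_tab]; simp
    · rw [pvSplitTab_other c ht]; cases pvSplitTab rest <;> simp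

theorem pvSplitTab_exists (chars : List Char) : ∃ f fs, pvSplitTab chars = f :: fs := by
  cases h : pvSplitTab chars with
  | nil => exact absurd h (pvSplitTab_ne_nil chars)
  | cons f fs => exact ⟨f, fs, rfl⟩

-- A-side: the loop computes finish over cur-prefixed fields
theorem pvLA : ∀ n chars, List.length chars ≤ n → ∀ cur : List Char,
    pvLoopA chars cur false = List.map pvFinish (pvConsHead cur (pvFields chars)) := by
  intro n
  induction n with
  | zero =>
    intro chars hlen cur
    have h0 : chars = [] := List.eq_nil_of_length_eq_zero (Nat.le_zero.mp hlen)
    subst h0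
    simp [pvLoopA, pvFields, pvConsHead]
  | succ n ih =>
    intro chars hlen cur
    match chars with
    | [] => simp [pvLoopA, pvFields, pvConsHead]
    | c :: rest =>
      by_cases hc : c = '\\'
      · subst hc
        match rest with
        | [] => simp [pvLoopA, pvFields, pvConsHead]
        | d :: rest' =>
          have h2 : rest'.length ≤ n := by simp at hlen; omega
          rw [show pvLoopA ('\\' :: d :: rest') cur false
              = pvLoopA rest' (cur ++ (if ¬(d = '\\' ∨ d = '\t') then ['\\', d] else [d])) false from by
            simp [pvLoopA]]
          rw [ih rest' h2]
          rw [pvFields_bs_cons, pvConsHead_consHead]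
          by_cases hd : d = '\\' ∨ d = '\t' <;> simp [hd]
      · by_cases ht : c = '\t'
        · subst ht
          have h2 : rest.length ≤ n := by simp at hlen; omega
          rw [show pvLoopA ('\t' :: rest) cur false = pvFinish cur :: pvLoopA rest [] false from by
            simp [pvLoopA, show ('\t' : Char) ≠ '\\' from by decide]]
          rw [ih rest h2, pvConsHead_nil (pvFields_ne_nil rest)]
          rw [pvFields_tab]
          simp [pvConsHead]
        · have h2 : rest.length ≤ n := by simp at hlen; omega
          rw [show pvLoopA (c :: rest) cur false = pvLoopA rest (cur ++ [c]) false from by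
            simp [pvLoopA, hc, ht]]
          rw [ih rest h2]
          rw [pvFields_other c hc ht, pvConsHead_consHead]

-- unescape distributes over a leading non-escape char
theorem pvUnesc_cons (c : Char) (h : c ≠ '\\') (f : List Char) :
    pvUnesc (c :: f) = c :: pvUnesc f := by
  cases f <;> simp [pvUnesc, h]

theorem pvUnesc_pair (d : Char) (f : List Char) :
    pvUnesc ('\\' :: d :: f) = (if d = '\\' ∨ d = '\t' then [d] else ['\\', d]) ++ pvUnesc f := by
  simp [pvUnesc]

theorem pvMap_unesc_consHead (x u : List Char) (l : List (List Char))
    (h : ∀ f, pvUnesc (x ++ f) = u ++ pvUnesc f) :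
    List.map pvUnesc (pvConsHead x l) = pvConsHead u (List.map pvUnesc l) := by
  cases l with
  | nil => simpa [pvConsHead, pvUnesc] using h []
  | cons f fs => simp [pvConsHead, h f]

-- B-side phase 2: unescaping the raw pieces gives the fields
theorem pvLB2 : ∀ n chars, List.length chars ≤ n →
    List.map pvUnesc (pvRawPieces chars) = pvFields chars := by
  intro n
  induction n with
  | zero =>
    intro chars hlen
    have h0 : chars = [] := List.eq_nil_of_length_eq_zero (Nat.le_zero.mp hlen)
    subst h0
    simp [pvRawPieces, pvFields, pvUnesc]
  | succ n ih =>
    intro chars hlen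
    match chars with
    | [] => simp [pvRawPieces, pvFields, pvUnesc]
    | c :: rest =>
      by_cases hc : c = '\\'
      · subst hc
        match rest with
        | [] => decide
        | d :: rest' =>
          have h2 : rest'.length ≤ n := by simp at hlen; omega
          rw [pvRawPieces_bs_cons]
          rw [pvMap_unesc_consHead ['\\', d] (if d = '\\' ∨ d = '\t' then [d] else ['\\', d]) _
            (fun f => pvUnesc_pair d f)]
          rw [ih rest' h2, pvFields_bs_cons]
      · by_cases ht : c = '\t'
        · subst ht
          have h2 : rest.length ≤ n := by simp at hlen; omega
          rw [pvRawPieces_tab, pvFields_tab]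
          rw [List.map_cons, ih rest h2]
          rfl
        · have h2 : rest.length ≤ n := by simp at hlen; omega
          rw [pvRawPieces_other c hc ht]
          rw [pvMap_unesc_consHead [c] [c] _ (fun f => pvUnesc_cons c hc f)]
          rw [ih rest h2, pvFields_other c hc ht]

-- trailing backslash-run length
def pvRun (x : List Char) : Nat := (x.reverse.takeWhile (fun c => c == '\\')).length

theorem pvOddTrail_eq (x : List Char) : pvOddTrail x = (pvRun x % 2 == 1) := rfl

theorem pvRun_append (x : List Char) (c : Char) :
    pvRun (x ++ [c]) = if c = '\\' then pvRun x + 1 else 0 := by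
  by_cases h : c = '\\' <;> simp [pvRun, h]

theorem pvRun_append2 (x : List Char) (c d : Char) :
    pvRun (x ++ [c, d]) = if d = '\\' then (if c = '\\' then pvRun x + 2 else 1) else 0 := by
  rw [show x ++ [c, d] = (x ++ [c]) ++ [d] from by simp, pvRun_append, pvRun_append]
  by_cases hd : d = '\\' <;> by_cases hc : c = '\\' <;> simp [hc, hd]

-- B-side phase 1: split + merge recovers the raw pieces
theorem pvLB1 : ∀ n chars, List.length chars ≤ n → ∀ x : List Char, pvRun x % 2 = 0 →
    ∀ p ps, pvSplitTab chars = p :: ps →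
    pvMergeLoop ps (x ++ p) = pvConsHead x (pvRawPieces chars) := by
  intro n
  induction n with
  | zero =>
    intro chars hlen x hx p ps hsplit
    have h0 : chars = [] := List.eq_nil_of_length_eq_zero (Nat.le_zero.mp hlen)
    subst h0
    simp only [pvSplitTab] at hsplit
    obtain ⟨hp, hps⟩ := List.cons.inj hsplit.symm
    subst hp; subst hps
    simp [pvMergeLoop, pvRawPieces, pvConsHead]
  | succ n ih =>
    intro chars hlen x hx p ps hsplit
    match chars with
    | [] =>
      simp only [pvSplitTab] at hsplit
      obtain ⟨hp, hps⟩ := List.cons.inj hsplit.symm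
      subst hp; subst hps
      simp [pvMergeLoop, pvRawPieces, pvConsHead]
    | c :: rest =>
      have hxodd : pvOddTrail x = false := by
        simp [pvOddTrail_eq]
        omega
      by_cases hc : c = '\\'
      · subst hc
        match rest with
        | [] =>
          rw [pvSplitTab_other '\\' (by decide) []] at hsplit
          simp only [pvSplitTab] at hsplit
          obtain ⟨hp, hps⟩ := List.cons.inj hsplit.symm
          subst hp; subst hps
          simp [pvMergeLoop, pvRawPieces, pvConsHead]
        | d :: rest' =>
          have h2 : rest'.length ≤ n := by simp at hlen; omega
          by_cases hd : d = '\t'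
          · subst hd
            rw [pvSplitTab_other '\\' (by decide), pvSplitTab_tab] at hsplit
            obtain ⟨hp, hps⟩ := List.cons.inj hsplit.symm
            subst hp; subst hps
            obtain ⟨q, qs, hq⟩ := pvSplitTab_exists rest'
            rw [hq]
            have hodd : pvOddTrail (x ++ ['\\']) = true := by
              simp [pvOddTrail_eq, pvRun_append]
              omega
            rw [show pvMergeLoop (q :: qs) (x ++ ['\\'])
                = pvMergeLoop qs ((x ++ ['\\', '\t']) ++ q) from by
              simp [pvMergeLoop, hodd]]
            have hx' : pvRun (x ++ ['\\', '\t']) % 2 = 0 := by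
              rw [pvRun_append2]; simp
            rw [ih rest' h2 (x ++ ['\\', '\t']) hx' q qs hq]
            rw [pvRawPieces_bs_cons, pvConsHead_consHead]
          · obtain ⟨f, fs, hf⟩ := pvSplitTab_exists rest'
            rw [pvSplitTab_other '\\' (by decide), pvSplitTab_other d hd, hf] at hsplit
            obtain ⟨hp, hps⟩ := List.cons.inj hsplit.symm
            rw [hp, hps]
            have hx' : pvRun (x ++ ['\\', d]) % 2 = 0 := by
              rw [pvRun_append2]
              by_cases hdb : d = '\\'
              · simp [hdb]; omega
              · simp [hdb]
            rw [show x ++ '\\' :: d :: f = (x ++ ['\\', d]) ++ f from by simp]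
            rw [ih rest' h2 (x ++ ['\\', d]) hx' f fs hf]
            rw [pvRawPieces_bs_cons, pvConsHead_consHead]
      · by_cases ht : c = '\t'
        · subst ht
          have h2 : rest.length ≤ n := by simp at hlen; omega
          rw [pvSplitTab_tab] at hsplit
          obtain ⟨hp, hps⟩ := List.cons.inj hsplit.symm
          subst hp; subst hps
          obtain ⟨q, qs, hq⟩ := pvSplitTab_exists rest
          rw [hq]
          rw [show pvMergeLoop (q :: qs) (x ++ []) = x :: pvMergeLoop qs q from by
            simp [pvMergeLoop, hxodd]]
          have hrec := ih rest h2 [] (by simp [pvRun]) q qs hq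
          simp only [List.nil_append] at hrec
          rw [hrec, pvConsHead_nil (pvRawPieces_ne_nil rest)]
          rw [pvRawPieces_tab]
          simp [pvConsHead]
        · have h2 : rest.length ≤ n := by simp at hlen; omega
          obtain ⟨f, fs, hf⟩ := pvSplitTab_exists rest
          rw [pvSplitTab_other c ht, hf] at hsplit
          obtain ⟨hp, hps⟩ := List.cons.inj hsplit.symm
          rw [hp, hps]
          have hx' : pvRun (x ++ [c]) % 2 = 0 := by simp [pvRun_append, hc]
          rw [show x ++ c :: f = (x ++ [c]) ++ f from by simp]
          rw [ih rest h2 (x ++ [c]) hx' f fs hf]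
          rw [pvRawPieces_other c hc ht, pvConsHead_consHead]

theorem pvFinish_eq (l : List Char) :
    pvFinish l = (if String.ofList l = "\\N" then none else some (String.ofList l)) := by
  unfold pvFinish
  by_cases h : l = ['\\', 'N']
  · subst h; simp
  · rw [if_neg h, if_neg]
    intro he
    apply h
    have hl := congrArg String.toList he
    simpa using hl

-- ===== VERDICT (by name: the statement is the Claim_ definition above) =====
theorem split_tsv_line_spec : Claim_equal_split_tsv_line := by
  unfold Claim_equal_split_tsv_line
  intro line _
  unfold Spec_split_tsv_line
  simp only [split_tsv_line, split_tsv_line_alt]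
  obtain ⟨p, ps, hsplit⟩ := pvSplitTab_exists line.toList
  rw [pvLA line.toList.length line.toList le_rfl []]
  rw [pvConsHead_nil (pvFields_ne_nil line.toList)]
  rw [hsplit]
  have hm : pvMergeLoop ps p = pvRawPieces line.toList := by
    have h1 := pvLB1 line.toList.length line.toList le_rfl [] (by simp [pvRun]) p ps hsplit
    simpa [pvConsHead_nil (pvRawPieces_ne_nil line.toList)] using h1
  have hmm : (match p :: ps with
      | [] => ([] : List (List Char))
      | p :: ps => pvMergeLoop ps p) = pvRawPieces line.toList := hm
  rw [hmm]
  rw [← pvLB2 line.toList.length line.toList le_rfl]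
  rw [List.map_map, List.map_map]
  apply List.map_congr_left
  intro m _
  simp [Function.comp, pvFinish_eq]
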